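-- pv_equiv track=rewrite | github.com/Schrodinger73/Obi-Wan-Kanobi | ABD.py | ar
-- ===== SOURCE A (Python) =====
-- def cut_array(a, j, n): #(array, element, number)
--     count = 0
--     cut = []
--     i = 0
--     while count < n and i < len(a):
--         if a[i] != j:
--             cut.append(a[i])
--             i += 1
--         if a[i] == j:
--             cut.append(a[i])
--             count += 1
--             i += 1
--     if count >= n or i >= len(a):
--         return cut
--
-- def ar(a, n, k):
--     ar = []
--     if a.count(n) < k:
--         ar = a
--         for i in range(0, len(a)):
--             if a[i] == n:
--                 ar[i] = 0
--     if a.count(n) >= k: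
--         ar = cut_array(a, n, k)
--         for i in range(0, len(cut_array(a, n, k))):
--             if ar[i] == n:
--                 ar[i] = 0
--     return ar
-- ===== SOURCE B (Python) =====
-- # B: one fused forward scan (count once; either zero in place, or build the
-- # prefix through the k-th occurrence directly, zeroing as we go).
-- def ar(a, n, k):
--     if a.count(n) < k:
--         for i, x in enumerate(a):
--             if x == n:
--                 a[i] = 0
--         return a
--     out = []
--     seen = 0
--     for x in a:
--         if seen >= k:
--             break
--         if x == n:
--             out.append(0)
--             seen += 1
--         else:
--             out.append(x)
--     return out
-- ===== Notes on version B (the rewrite author's own statement) =====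
-- stated objective: simpler
-- what changed: B counts n once, then either zeroes in place or builds the truncated result in ONE forward scan that fuses A's separate cut_array prefix-building pass and the subsequent zeroing pass (A even calls cut_array twice), eliminating the cut_array helper and its double-stepping while loop.
import Mathlib
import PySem

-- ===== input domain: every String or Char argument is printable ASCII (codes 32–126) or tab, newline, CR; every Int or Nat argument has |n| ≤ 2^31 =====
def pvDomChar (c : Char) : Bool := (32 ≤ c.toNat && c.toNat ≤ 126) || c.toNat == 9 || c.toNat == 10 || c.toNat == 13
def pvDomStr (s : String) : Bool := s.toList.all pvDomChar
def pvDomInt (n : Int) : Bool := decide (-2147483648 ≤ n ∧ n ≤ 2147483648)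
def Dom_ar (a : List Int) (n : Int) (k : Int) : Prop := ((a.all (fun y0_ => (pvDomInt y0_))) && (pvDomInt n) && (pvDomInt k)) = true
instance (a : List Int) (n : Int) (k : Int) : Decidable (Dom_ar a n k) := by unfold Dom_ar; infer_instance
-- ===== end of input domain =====

-- B fuses A's cut_array pass and zeroing pass into one scan ('simpler'); when count(n) < k
-- both A and B mutate the argument list in place and return it — the theorems are about the
-- RETURN value only (the in-place mutation is the same in both).

-- ===== PORT A =====

-- while-loop of cut_array; fuel only makes the recursion total (i grows each iteration,
-- fuel = len+1 at the call site is enough); the 'none' arm is Python's IndexError path,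
-- unreachable from ar (ar only calls cut_array when a.count(n) ≥ k).
def cutLoop (a : List Int) (j : Int) (nn : Int) : Nat → Int → Int → List Int → List Int
  | 0, _, _, cut => cut
  | fuel+1, count, i, cut =>
    if count < nn ∧ i < (a.length : Int) then
      let s :=
        match PySem.List.pyGet? a i with
        | some x => if x ≠ j then (cut ++ [x], i + 1) else (cut, i)
        | none => (cut, i)
      match PySem.List.pyGet? a s.2 with
      | some y =>
          if y = j then cutLoop a j nn fuel (count + 1) (s.2 + 1) (s.1 ++ [y])
          else cutLoop a j nn fuel count s.2 s.1
      | none => s.1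
    else cut

def cut_array (a : List Int) (j : Int) (n : Int) : List Int :=
  cutLoop a j n (a.length + 1) 0 0 []

def ar (a : List Int) (n : Int) (k : Int) : List Int :=
  let ar0 : List Int := []
  let p :=
    if ((PySem.List.count a n : Int) < k) then
      let m := (List.range a.length).foldl
        (fun ac (i : Nat) => if PySem.List.pyGet? ac (i : Int) = some n then ac.set i 0 else ac) a
      (m, m)
    else (a, ar0)
  if ((PySem.List.count p.1 n : Int) ≥ k) then
    (List.range (cut_array p.1 n k).length).foldl
      (fun ac (i : Nat) => if PySem.List.pyGet? ac (i : Int) = some n then ac.set i 0 else ac)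
      (cut_array p.1 n k)
  else p.2

-- ===== PORT B =====

def altLoop (n : Int) (k : Int) : List Int → Int → List Int → List Int
  | [], _, out => out
  | x :: rest, seen, out =>
    if seen ≥ k then out
    else if x = n then altLoop n k rest (seen + 1) (out ++ [0])
    else altLoop n k rest seen (out ++ [x])

def ar_alt (a : List Int) (n : Int) (k : Int) : List Int :=
  if ((PySem.List.count a n : Int) < k) then
    (PySem.List.enumerate a 0).foldl
      (fun ac p => if p.2 = n then ac.set p.1.toNat 0 else ac) a
  else altLoop n k a 0 []

-- ===== PRECONDITION & SPEC =====
def Spec_ar (a : List Int) (n : Int) (k : Int) (out : List Int) : Prop := out = ar_alt a n k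
instance (a : List Int) (n : Int) (k : Int) (out : List Int) : Decidable (Spec_ar a n k out) := by unfold Spec_ar; infer_instance

-- ===== CLAIM (what is proved, stated in full; the proofs are below) =====
def Claim_equal_ar : Prop := ∀ (a : List Int) (n : Int) (k : Int), Dom_ar a n k → Spec_ar a n k (ar a n k)

-- ===== LEMMAS AND PROOFS =====

/-- zero out one value -/
def zeroIf (n x : Int) : Int := if x = n then 0 else x

/-- prefix of `l` through the `m`-th occurrence of `j` (whole list if fewer). -/
def pvCut (j : Int) : List Int → Int → List Int
  | [], _ => []
  | x :: r, m => if m ≤ 0 then [] else if x = j then x :: pvCut j r (m - 1) else x :: pvCut j r m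

/-- the common value of both programs in the truncating branch. -/
def pvSpec (n : Int) : List Int → Int → List Int
  | [], _ => []
  | x :: r, m => if m ≤ 0 then [] else if x = n then 0 :: pvSpec n r (m - 1) else x :: pvSpec n r m

theorem pvCut_nonpos (j : Int) (l : List Int) (m : Int) (h : m ≤ 0) : pvCut j l m = [] := by
  cases l <;> simp [pvCut, h]

theorem getpre (pre suf : List Int) (x : Int) :
    PySem.List.pyGet? (pre ++ x :: suf) ((pre.length : Nat) : Int) = some x := by
  rw [PySem.List.pyGet?_natCast]
  simp

theorem rangeFold_eq_map (n : Int) : ∀ (suf pre : List Int),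
    (List.range' pre.length suf.length).foldl
      (fun ac (i : Nat) => if PySem.List.pyGet? ac (i : Int) = some n then ac.set i 0 else ac)
      (pre ++ suf) = pre ++ suf.map (zeroIf n) := by
  intro suf
  induction suf with
  | nil => intro pre; simp
  | cons x r ih =>
    intro pre
    rw [List.length_cons, List.range'_succ, List.foldl_cons]
    have hacc : (if PySem.List.pyGet? (pre ++ x :: r) ((pre.length : Nat) : Int) = some n
        then (pre ++ x :: r).set pre.length 0 else (pre ++ x :: r)) = pre ++ zeroIf n x :: r := by
      rw [getpre]
      by_cases hx : x = n
      · simp [hx, zeroIf]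
      · simp [hx, zeroIf]
    rw [hacc]
    have h1 : pre ++ zeroIf n x :: r = (pre ++ [zeroIf n x]) ++ r := by simp
    have h2 : pre.length + 1 = (pre ++ [zeroIf n x]).length := by simp
    rw [h1, h2, ih]
    simp

theorem enumFold_eq_map (n : Int) : ∀ (suf pre : List Int),
    (PySem.List.enumerate suf (pre.length : Int)).foldl
      (fun ac p => if p.2 = n then ac.set p.1.toNat 0 else ac)
      (pre ++ suf) = pre ++ suf.map (zeroIf n) := by
  intro suf
  induction suf with
  | nil => intro pre; simp [PySem.List.enumerate]
  | cons x r ih =>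
    intro pre
    rw [PySem.List.enumerate_cons, List.foldl_cons]
    have hacc : (if x = n then (pre ++ x :: r).set ((pre.length : Int)).toNat 0
        else (pre ++ x :: r)) = pre ++ zeroIf n x :: r := by
      by_cases hx : x = n
      · simp [hx, zeroIf]
      · simp [hx, zeroIf]
    simp only [hacc]
    have h1 : pre ++ zeroIf n x :: r = (pre ++ [zeroIf n x]) ++ r := by simp
    have h2 : (pre.length : Int) + 1 = (((pre ++ [zeroIf n x]).length : Nat) : Int) := by
      simp
    rw [h1, h2, ih]
    simp

theorem altLoop_eq (n k : Int) : ∀ (l : List Int) (seen : Int) (out : List Int),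
    altLoop n k l seen out = out ++ pvSpec n l (k - seen) := by
  intro l
  induction l with
  | nil => intro seen out; simp [altLoop, pvSpec]
  | cons x r ih =>
    intro seen out
    by_cases hs : seen ≥ k
    · have h0 : k - seen ≤ 0 := by omega
      simp [altLoop, hs, pvSpec, h0]
    · have h0 : ¬ (k - seen ≤ 0) := by omega
      have h1 : k - (seen + 1) = k - seen - 1 := by ring
      by_cases hx : x = n
      · simp [altLoop, hs, hx, ih, pvSpec, h0, h1]
      · simp [altLoop, hs, hx, ih, pvSpec, h0]

theorem cutLoop_eq (a : List Int) (j nn : Int) : ∀ (fuel : Nat) (i : Nat) (count : Int) (cut : List Int),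
    a.length - i < fuel → nn - count ≤ ((a.drop i).count j : Int) →
    cutLoop a j nn fuel count (i : Int) cut = cut ++ pvCut j (a.drop i) (nn - count) := by
  intro fuel
  induction fuel with
  | zero => intro i count cut h1 h2; omega
  | succ fuel ih =>
    intro i count cut h1 h2
    by_cases hc : count < nn
    · by_cases hi : i < a.length
      · have hguard : count < nn ∧ (i : Int) < (a.length : Int) := ⟨hc, by exact_mod_cast hi⟩
        have hget : PySem.List.pyGet? a (i : Int) = some a[i] := by
          rw [PySem.List.pyGet?_natCast]; simp [hi]
        have hdrop : a.drop i = a[i] :: a.drop (i + 1) := List.drop_eq_getElem_cons hi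
        have hnp : ¬ (nn - count ≤ 0) := by omega
        by_cases hx : a[i] = j
        · have hcnt : ((a.drop (i + 1)).count j : Int) = ((a.drop i).count j : Int) - 1 := by
            rw [hdrop, List.count_cons]
            simp [hx]
          have hcast : (i : Int) + 1 = ((i + 1 : Nat) : Int) := by push_cast; ring
          rw [cutLoop, if_pos hguard]
          simp only [hget, hx, ne_eq, not_true_eq_false, Bool.false_eq_true, if_false, ite_false,
            if_true, ite_true, hcast]
          rw [ih (i + 1) (count + 1) (cut ++ [j]) (by omega) (by omega)]
          rw [hdrop, pvCut, if_neg hnp, if_pos hx]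
          have heq : nn - (count + 1) = nn - count - 1 := by ring
          simp [heq, hx]
        · by_cases hi1 : i + 1 < a.length
          · have hget1 : PySem.List.pyGet? a ((i : Int) + 1) = some a[i + 1] := by
              have : (i : Int) + 1 = ((i + 1 : Nat) : Int) := by push_cast; ring
              rw [this, PySem.List.pyGet?_natCast]; simp [hi1]
            have hdrop1 : a.drop (i + 1) = a[i + 1] :: a.drop (i + 2) := List.drop_eq_getElem_cons hi1
            have hcnt1 : ((a.drop (i + 1)).count j : Int) = ((a.drop i).count j : Int) := by
              rw [hdrop, List.count_cons]
              simp [hx]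
            by_cases hy : a[i + 1] = j
            · have hcnt2 : ((a.drop (i + 2)).count j : Int) = ((a.drop (i + 1)).count j : Int) - 1 := by
                rw [hdrop1, List.count_cons]
                simp [hy]
              have hcast : (i : Int) + 1 + 1 = ((i + 2 : Nat) : Int) := by push_cast; ring
              rw [cutLoop, if_pos hguard]
              simp only [hget, hget1, ne_eq, hx, not_false_eq_true, if_true, ite_true, hy,
                ite_false, hcast]
              rw [ih (i + 2) (count + 1) (cut ++ [a[i]] ++ [j]) (by omega) (by omega)]
              rw [hdrop, pvCut, if_neg hnp, if_neg hx, hdrop1, pvCut, if_neg hnp, if_pos hy]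
              have heq : nn - (count + 1) = nn - count - 1 := by ring
              simp [heq, hy]
            · have hcast : (i : Int) + 1 = ((i + 1 : Nat) : Int) := by push_cast; ring
              rw [cutLoop, if_pos hguard]
              simp only [hget, hget1, ne_eq, hx, not_false_eq_true, if_true, ite_true, hy,
                ite_false, if_false, hcast]
              rw [ih (i + 1) count (cut ++ [a[i]]) (by omega) (by omega)]
              rw [hdrop, pvCut, if_neg hnp, if_neg hx]
              simp
              rw [hget1]
              simp [hy]
          · exfalso
            have hnil : a.drop (i + 1) = [] := List.drop_eq_nil_of_le (by omega)
            have : (a.drop i).count j = 0 := by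
              rw [hdrop, hnil, List.count_cons]
              simp [hx]
            omega
      · have hnil : a.drop i = [] := List.drop_eq_nil_of_le (by omega)
        rw [cutLoop, if_neg (by push_cast; omega)]
        simp [hnil, pvCut]
    · rw [cutLoop, if_neg (by omega)]
      rw [pvCut_nonpos j _ (nn - count) (by omega)]
      simp

theorem map_pvCut (n : Int) : ∀ (l : List Int) (m : Int),
    (pvCut n l m).map (zeroIf n) = pvSpec n l m := by
  intro l
  induction l with
  | nil => intro m; simp [pvCut, pvSpec]
  | cons x r ih =>
    intro m
    by_cases hm : m ≤ 0
    · simp [pvCut, pvSpec, hm]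
    · by_cases hx : x = n <;> simp [pvCut, pvSpec, hm, hx, zeroIf, ih]

theorem count_map_zeroIf (n : Int) (hn : n ≠ 0) (l : List Int) :
    (l.map (zeroIf n)).count n = 0 := by
  rw [List.count_eq_zero]
  intro hmem
  rcases List.mem_map.1 hmem with ⟨x, _, hx⟩
  by_cases h : x = n <;> simp [zeroIf, h] at hx <;> omega

theorem map_zeroIf_zero (l : List Int) : l.map (zeroIf 0) = l := by
  induction l with
  | nil => rfl
  | cons x r ih => by_cases h : x = 0 <;> simp [zeroIf, h, ih]

-- ===== VERDICT (by name: the statement is the Claim_ definition above) =====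
theorem ar_spec : Claim_equal_ar := by
  unfold Claim_equal_ar
  intro a n k _
  unfold Spec_ar ar ar_alt
  have hm : (List.range a.length).foldl
      (fun ac (i : Nat) => if PySem.List.pyGet? ac (i : Int) = some n then ac.set i 0 else ac) a
      = a.map (zeroIf n) := by
    have h := rangeFold_eq_map n a []
    simpa [List.range_eq_range'] using h
  have hb : (PySem.List.enumerate a 0).foldl
      (fun ac p => if p.2 = n then ac.set p.1.toNat 0 else ac) a = a.map (zeroIf n) := by
    have h := enumFold_eq_map n a []
    simpa using h
  by_cases hc : ((PySem.List.count a n : Int) < k)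
  · simp only [if_pos hc, hm, hb]
    by_cases hn : n = 0
    · subst hn
      rw [map_zeroIf_zero]
      rw [if_neg (by omega)]
    · have h0 : (PySem.List.count (a.map (zeroIf n)) n : Int) = 0 := by
        rw [PySem.List.count_eq, count_map_zeroIf n hn]
        simp
      rw [if_neg (by omega)]
  · have hcut : cut_array a n k = pvCut n a k := by
      unfold cut_array
      have hc' : k ≤ ((List.count n a : Nat) : Int) := by
        rw [PySem.List.count_eq] at hc
        omega
      have h := cutLoop_eq a n k (a.length + 1) 0 0 [] (by omega)
        (by simpa using hc')
      simpa using h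
    have hfold : (List.range (cut_array a n k).length).foldl
        (fun ac (i : Nat) => if PySem.List.pyGet? ac (i : Int) = some n then ac.set i 0 else ac)
        (cut_array a n k) = pvSpec n a k := by
      have h := rangeFold_eq_map n (cut_array a n k) []
      rw [List.range_eq_range']
      simpa [hcut, map_pvCut] using h
    have halt : altLoop n k a 0 [] = pvSpec n a k := by
      have h := altLoop_eq n k a 0 []
      simpa using h
    simp only [if_neg hc, if_pos (by omega : (PySem.List.count a n : Int) ≥ k), hfold, halt]
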